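-- pv_equiv track=rewrite | github.com/chime-sps/champss_timing | backend/utils/utils.py | get_archive_id
-- ===== SOURCE A (Python) =====
-- def get_archive_id(archive):
--     arid = ""
--     arname_splitted = archive.split('/')[-1].split('.')
--
--     for i in range(len(arname_splitted)):
--         if i == 0:
--             arid += arname_splitted[i]
--         else:
--             try:
--                 float(arname_splitted[i-1][-1] + "." + arname_splitted[i][0])
--                 arid += "." + arname_splitted[i]
--             except:
--                 break
--
--     return arid
-- ===== SOURCE B (Python) =====
-- def get_archive_id(archive):
--     seg = archive.split('/')[-1].split('.')
--
--     def ok(prev, cur):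
--         try:
--             float(prev[-1] + "." + cur[0])
--             return True
--         except:
--             return False
--
--     k = 0
--     while k + 1 < len(seg) and ok(seg[k], seg[k + 1]):
--         k += 1
--     return '.'.join(seg[:k + 1])
-- ===== Notes on version B (the rewrite author's own statement) =====
-- stated objective: simpler
-- what changed: B first counts how many leading dot-boundaries pass the float test (a while loop over segment pairs) and then joins the first k+1 segments once, instead of A's incremental string accumulation with break.
import Mathlib
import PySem

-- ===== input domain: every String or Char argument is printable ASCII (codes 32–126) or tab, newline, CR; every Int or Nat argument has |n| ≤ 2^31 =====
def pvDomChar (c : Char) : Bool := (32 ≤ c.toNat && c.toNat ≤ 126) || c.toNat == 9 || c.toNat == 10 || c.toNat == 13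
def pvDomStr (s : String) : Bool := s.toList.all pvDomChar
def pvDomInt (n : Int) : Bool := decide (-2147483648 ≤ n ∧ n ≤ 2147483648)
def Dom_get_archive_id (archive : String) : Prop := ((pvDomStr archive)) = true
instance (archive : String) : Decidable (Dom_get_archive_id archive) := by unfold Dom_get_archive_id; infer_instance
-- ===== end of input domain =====

-- B computes the cut index k first (counting the passing dot-boundaries) and joins
-- the first k+1 segments once, instead of A's accumulate-and-break string building;
-- objective: simpler (cut point then one join), same cost.

-- ===== PORT A =====
-- shared preprocessing: archive.split('/')[-1].split('.')  (split never yields [],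
-- so [-1] cannot raise; pyGetD's default is unreachable)
def pvSegs (archive : String) : List (List Char) :=
  PySem.Chars.splitOn (PySem.List.pyGetD (PySem.Chars.splitOn archive.toList ['/']) (-1) []) ['.']

-- try: float(prev[-1] + "." + cur[0])  — succeeds iff the 3-char string "c1.c2" parses;
-- exact on the Dom charset (digit.digit/ws, ws-or-sign.digit); IndexError (empty seg) → false
def pvFloatOk (prev cur : List Char) : Bool :=
  match PySem.List.pyGet? prev (-1), PySem.List.pyGet? cur 0 with
  | some a, some b =>
      let ws : Char → Bool := fun c => c == ' ' || c == '\t' || c == '\n' || c == '\r'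
      (a.isDigit && (b.isDigit || ws b)) || ((ws a || a == '+' || a == '-') && b.isDigit)
  | _, _ => false

-- the for-loop of A, with break rendered as returning the accumulator
def pvLoopA (seg : List (List Char)) (i : Nat) (arid : List Char) : List Char :=
  if h : i < seg.length then
    if i = 0 then pvLoopA seg (i + 1) (arid ++ seg[i])
    else if pvFloatOk (seg[i - 1]'(by omega)) seg[i] then
      pvLoopA seg (i + 1) (arid ++ '.' :: seg[i])
    else arid
  else arid
termination_by seg.length - i

def get_archive_id (archive : String) : String :=
  String.mk (pvLoopA (pvSegs archive) 0 [])

-- ===== PORT B =====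
-- Source B's while loop: count the leading boundaries that pass
def pvCountK (seg : List (List Char)) (k : Nat) : Nat :=
  if h : k + 1 < seg.length then
    if pvFloatOk seg[k] seg[k + 1] then pvCountK seg (k + 1) else k
  else k
termination_by seg.length - k

def get_archive_id_alt (archive : String) : String :=
  let seg := pvSegs archive
  String.mk (PySem.Chars.join ['.'] (seg.take (pvCountK seg 0 + 1)))

-- ===== PRECONDITION & SPEC =====
def Spec_get_archive_id (archive : String) (out : String) : Prop := out = get_archive_id_alt archive
instance (archive : String) (out : String) : Decidable (Spec_get_archive_id archive out) := by unfold Spec_get_archive_id; infer_instance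

-- ===== CLAIM (what is proved, stated in full; the proofs are below) =====
def Claim_equal_get_archive_id : Prop := ∀ (archive : String), Dom_get_archive_id archive → Spec_get_archive_id archive (get_archive_id archive)

-- ===== LEMMAS AND PROOFS =====

-- join over '.' of a nonempty snoc
theorem pvJoin_snoc (xs : List (List Char)) (x : List Char) (h : xs ≠ []) :
    PySem.Chars.join ['.'] (xs ++ [x]) = PySem.Chars.join ['.'] xs ++ '.' :: x := by
  induction xs with
  | nil => exact absurd rfl h
  | cons a tl ih =>
    cases tl with
    | nil => simp [PySem.Chars.join_cons_cons, PySem.Chars.join_singleton]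
    | cons b tl' =>
      have ih' := ih (by simp)
      simp only [List.cons_append] at ih' ⊢
      rw [PySem.Chars.join_cons_cons, ih', PySem.Chars.join_cons_cons]
      simp

-- core invariant: A's loop from i = k+1 with accumulator join(seg[:k+1])
-- computes join(seg[:countK(k)+1])
theorem pvLoop_eq_count (seg : List (List Char)) (k : Nat) :
    pvLoopA seg (k + 1) (PySem.Chars.join ['.'] (seg.take (k + 1))) =
      PySem.Chars.join ['.'] (seg.take (pvCountK seg k + 1)) := by
  by_cases h : k + 1 < seg.length
  · by_cases hok : pvFloatOk (seg[k]'(by omega)) (seg[k + 1]'h) = true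
    · rw [pvLoopA]
      simp only [h, dif_pos, if_neg (Nat.succ_ne_zero k), Nat.add_sub_cancel]
      rw [if_pos hok]
      have htake : seg.take (k + 2) = seg.take (k + 1) ++ [seg[k + 1]'h] := by
        rw [List.take_succ]
        simp [h]
      have hne : seg.take (k + 1) ≠ [] := by
        have hl : (seg.take (k + 1)).length = min (k + 1) seg.length := List.length_take
        intro hc
        rw [hc] at hl
        simp at hl
        omega
      have : PySem.Chars.join ['.'] (seg.take (k + 1)) ++ '.' :: (seg[k + 1]'h) =
          PySem.Chars.join ['.'] (seg.take (k + 1 + 1)) := by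
        rw [htake, pvJoin_snoc _ _ hne]
      have hck : pvCountK seg k = pvCountK seg (k + 1) := by
        conv_lhs => rw [pvCountK]
        rw [dif_pos h, if_pos hok]
      rw [this, pvLoop_eq_count seg (k + 1), hck]
    · rw [pvLoopA]
      simp only [h, dif_pos, if_neg (Nat.succ_ne_zero k), Nat.add_sub_cancel]
      rw [if_neg hok, pvCountK]
      rw [dif_pos h, if_neg hok]
  · rw [pvLoopA, pvCountK]
    simp [h]
termination_by seg.length - k

-- ===== VERDICT (by name: the statement is the Claim_ definition above) =====
theorem get_archive_id_spec : Claim_equal_get_archive_id := by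
  intro archive _
  unfold Spec_get_archive_id get_archive_id get_archive_id_alt
  congr 1
  generalize pvSegs archive = seg
  cases seg with
  | nil =>
    rw [pvLoopA, pvCountK]
    simp [PySem.Chars.join_nil]
  | cons s tl =>
    rw [pvLoopA]
    have h0 : 0 < (s :: tl).length := by simp
    rw [dif_pos h0, if_pos rfl]
    have h1 : ([] : List Char) ++ (s :: tl)[0] = PySem.Chars.join ['.'] ((s :: tl).take 1) := by
      simp [PySem.Chars.join_singleton]
    rw [h1]
    exact pvLoop_eq_count (s :: tl) 0
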